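-- pv_equiv track=rewrite | github.com/serlabel/Tuenti-Challenge-6 | 12/pika_virus.py | check_isomorph
-- ===== SOURCE A (Python) =====
-- def check_isomorph(original, other, orig_node, othr_node):
--     # If some node is None -> False
--     if orig_node is None or othr_node is None:
--         return False
--     # Case 1: some node doesn't have any children
--     if orig_node not in original and othr_node not in other:
--         return True
--     # Case 2: every children has an equivalent node
--     #         both nodes must have the same num. of children
--     if (orig_node in original and othr_node in other and
--         len(original[orig_node]) == len(other[othr_node])):
--         assigned = [False] * len(other[othr_node])
--         for othr_child in other[othr_node]:
--             match = False
--             for i in range(len(original[orig_node])):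
--                 if not assigned[i]:
--                     if check_isomorph(original, other,
--                                       original[orig_node][i],
--                                       othr_child):
--                         assigned[i] = True
--                         match = True
--                         break
--             if not match:
--                 return False
--         return True
--     return False
-- ===== SOURCE B (Python) =====
-- def check_isomorph(original, other, orig_node, othr_node):
--     # memoized pair-isomorphism with a shrinking "remaining children" list
--     if orig_node is None or othr_node is None:
--         return False
--     memo = {}
--
--     def iso(u, v):
--         key = (u, v)
--         if key in memo:
--             return memo[key]
--         cs_u = original.get(u)
--         cs_v = other.get(v)
--         if cs_u is None and cs_v is None:
--             res = True
--         elif cs_u is None or cs_v is None or len(cs_u) != len(cs_v):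
--             res = False
--         else:
--             remaining = list(cs_u)
--             res = True
--             for vc in cs_v:
--                 for j in range(len(remaining)):
--                     if iso(remaining[j], vc):
--                         remaining.pop(j)
--                         break
--                 else:
--                     res = False
--                     break
--         memo[key] = res
--         return res
--
--     return iso(orig_node, othr_node)
-- ===== Notes on version B (the rewrite author's own statement) =====
-- stated objective: alternative
-- what changed: B memoizes the pair-isomorphism predicate in a dict keyed by (orig_node, othr_node) so each node pair is decided at most once, and matches children by popping from a shrinking 'remaining' list instead of A's assigned-flag index scan.
-- outside the precondition, e.g. on check_isomorph({0: [0]}, {1: [1, 1]}, 0, 1): A returns False, B returns False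
import Mathlib
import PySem

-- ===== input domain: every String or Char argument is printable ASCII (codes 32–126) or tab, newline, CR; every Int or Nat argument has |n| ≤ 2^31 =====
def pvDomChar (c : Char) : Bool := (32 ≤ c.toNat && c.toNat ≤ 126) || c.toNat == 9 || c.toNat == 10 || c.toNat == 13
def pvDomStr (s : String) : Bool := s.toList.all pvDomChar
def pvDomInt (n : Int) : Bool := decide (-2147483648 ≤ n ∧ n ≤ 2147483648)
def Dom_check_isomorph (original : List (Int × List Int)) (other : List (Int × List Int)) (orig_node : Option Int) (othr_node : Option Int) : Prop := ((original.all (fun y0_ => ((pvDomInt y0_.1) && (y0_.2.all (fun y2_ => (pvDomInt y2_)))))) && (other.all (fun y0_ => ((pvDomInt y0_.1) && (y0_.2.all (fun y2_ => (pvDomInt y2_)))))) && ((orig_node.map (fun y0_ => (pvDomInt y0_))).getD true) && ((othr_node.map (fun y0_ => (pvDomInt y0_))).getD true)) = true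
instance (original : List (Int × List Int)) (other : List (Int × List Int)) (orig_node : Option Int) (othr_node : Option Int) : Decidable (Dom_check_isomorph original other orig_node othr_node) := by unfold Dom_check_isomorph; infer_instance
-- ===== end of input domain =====

-- B memoizes the pair-isomorphism test in a dict keyed by (orig_node, othr_node), deciding each node
-- pair at most once, and matches children by popping from a shrinking "remaining" list instead of A's
-- assigned-flag index scan; same return value on every admitted input.

-- ===== PORT A =====
-- dict lookup (association list, first match)
def pvDget : List (Int × List Int) → Int → Option (List Int)
  | [], _ => none
  | (k', v) :: rest, k => if k' == k then some v else pvDget rest k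

-- A's inner 'for i in range(len(original[orig_node]))' loop over the children paired with their
-- 'assigned' flags: first unassigned isomorphic child gets its flag set (break), none => no match.
def pvInnerA (rec : Int → Int → Bool) (vc : Int) : List (Int × Bool) → Option (List (Int × Bool))
  | [] => none
  | (uc, a) :: rest =>
    if !a && rec uc vc then some ((uc, true) :: rest)
    else
      match pvInnerA rec vc rest with
      | some rest' => some ((uc, a) :: rest')
      | none => none

-- A's outer 'for othr_child in other[othr_node]' loop
def pvOuterA (rec : Int → Int → Bool) : List (Int × Bool) → List Int → Bool
  | _, [] => true
  | pairs, vc :: vcs =>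
    match pvInnerA rec vc pairs with
    | some pairs' => pvOuterA rec pairs' vcs
    | none => false

-- A's recursion, fuel-bounded (fuel only makes the recursion structural; under Pre_ it never runs out)
def pvGoA (original other : List (Int × List Int)) : Nat → Option Int → Option Int → Bool
  | 0, _, _ => false
  | Nat.succ f, orig_node, othr_node =>
    match orig_node, othr_node with
    | none, _ => false
    | some _, none => false
    | some u, some v =>
      match pvDget original u, pvDget other v with
      | none, none => true
      | some csU, some csV =>
        if csU.length = csV.length then
          pvOuterA (fun uc vc => pvGoA original other f (some uc) (some vc))
            (csU.map (fun uc => (uc, false))) csV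
        else false
      | _, _ => false

def check_isomorph (original : List (Int × List Int)) (other : List (Int × List Int)) (orig_node : Option Int) (othr_node : Option Int) : Bool :=
  pvGoA original other (original.length + other.length + 2) orig_node othr_node

-- ===== PORT B =====
-- 'memo[key] = res; return res'
def pvStore (u v : Int) (r : Bool × PySem.Dict (Int × Int) Bool) : Bool × PySem.Dict (Int × Int) Bool :=
  (r.1, r.2.insert (u, v) r.1)

-- B's inner loop: scan 'remaining', pop the first child isomorphic to vc (memo threaded through)
def pvFindB (rec : Int → Int → PySem.Dict (Int × Int) Bool → Bool × PySem.Dict (Int × Int) Bool) (vc : Int) :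
    List Int → PySem.Dict (Int × Int) Bool → Option (List Int) × PySem.Dict (Int × Int) Bool
  | [], m => (none, m)
  | uc :: rest, m =>
    match rec uc vc m with
    | (true, m') => (some rest, m')
    | (false, m') =>
      match pvFindB rec vc rest m' with
      | (o, m'') => ((o.map (fun r => uc :: r)), m'')

-- B's outer loop over other's children
def pvMatchB (rec : Int → Int → PySem.Dict (Int × Int) Bool → Bool × PySem.Dict (Int × Int) Bool) :
    List Int → List Int → PySem.Dict (Int × Int) Bool → Bool × PySem.Dict (Int × Int) Bool
  | _, [], m => (true, m)
  | remaining, vc :: vcs, m =>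
    match pvFindB rec vc remaining m with
    | (some rem', m') => pvMatchB rec rem' vcs m'
    | (none, m') => (false, m')

-- B's memoized recursion 'iso'
def pvGoB (original other : List (Int × List Int)) : Nat → Int → Int → PySem.Dict (Int × Int) Bool → Bool × PySem.Dict (Int × Int) Bool
  | 0, _, _, m => (false, m)
  | Nat.succ f, u, v, m =>
    match m.get? (u, v) with
    | some b => (b, m)
    | none =>
      pvStore u v
        (match pvDget original u, pvDget other v with
         | none, none => (true, m)
         | some csU, some csV =>
           if csU.length = csV.length then
             pvMatchB (fun uc vc mm => pvGoB original other f uc vc mm) csU csV m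
           else (false, m)
         | _, _ => (false, m))

def check_isomorph_alt (original : List (Int × List Int)) (other : List (Int × List Int)) (orig_node : Option Int) (othr_node : Option Int) : Bool :=
  match orig_node, othr_node with
  | some u, some v => (pvGoB original other (original.length + other.length + 2) u v PySem.Dict.empty).1
  | _, _ => false

-- ===== PRECONDITION & SPEC =====
-- every path of child links from u ends within k steps
def pvAcyc (original : List (Int × List Int)) : Nat → Int → Bool
  | 0, _ => false
  | Nat.succ k, u =>
    match pvDget original u with
    | none => true
    | some cs => cs.all (pvAcyc original k)

-- Pre_ excludes inputs where a child-link cycle is reachable from the queried node in 'original' and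
-- also from the queried node in 'other': there A's unbounded recursion can exceed Python's recursion
-- limit (RecursionError); where a reachable cycle exists on at most one side the recursion depth is
-- bounded and A always returns (some both-sides-cyclic inputs on which A happens to return early are
-- excluded too, A and B agree there as well).
def pvPreB (original : List (Int × List Int)) (other : List (Int × List Int)) (orig_node : Option Int) (othr_node : Option Int) : Bool :=
  match orig_node, othr_node with
  | some u, some v =>
    pvAcyc original (original.length + other.length + 1) u ||
    pvAcyc other (original.length + other.length + 1) v
  | _, _ => true

def Pre_check_isomorph (original : List (Int × List Int)) (other : List (Int × List Int)) (orig_node : Option Int) (othr_node : Option Int) : Prop :=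
  pvPreB original other orig_node othr_node = true

instance (original : List (Int × List Int)) (other : List (Int × List Int)) (orig_node : Option Int) (othr_node : Option Int) : Decidable (Pre_check_isomorph original other orig_node othr_node) := by unfold Pre_check_isomorph; infer_instance

def pvWitness_check_isomorph : (List (Int × List Int)) × (List (Int × List Int)) × Option Int × Option Int :=
  ([(1, [2, 3]), (2, [])], [(5, [6, 7])], some 1, some 5)

def Spec_check_isomorph (original : List (Int × List Int)) (other : List (Int × List Int)) (orig_node : Option Int) (othr_node : Option Int) (out : Bool) : Prop := out = check_isomorph_alt original other orig_node othr_node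
instance (original : List (Int × List Int)) (other : List (Int × List Int)) (orig_node : Option Int) (othr_node : Option Int) (out : Bool) : Decidable (Spec_check_isomorph original other orig_node othr_node out) := by unfold Spec_check_isomorph; infer_instance

-- ===== CLAIM (what is proved, stated in full; the proofs are below) =====
def Claim_equal_check_isomorph : Prop := ∀ (original : List (Int × List Int)) (other : List (Int × List Int)) (orig_node : Option Int) (othr_node : Option Int), Dom_check_isomorph original other orig_node othr_node → Pre_check_isomorph original other orig_node othr_node → Spec_check_isomorph original other orig_node othr_node (check_isomorph original other orig_node othr_node)

-- ===== LEMMAS AND PROOFS =====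

theorem pvAcyc_pos {g : List (Int × List Int)} {k : Nat} {u : Int}
    (h : pvAcyc g k u = true) : 1 ≤ k := by
  cases k with
  | zero => simp [pvAcyc] at h
  | succ k => omega

theorem pvAcyc_child {g : List (Int × List Int)} {k : Nat} {u uc : Int} {cs : List Int}
    (h : pvAcyc g (k + 1) u = true) (hg : pvDget g u = some cs) (hm : uc ∈ cs) :
    pvAcyc g k uc = true := by
  simp [pvAcyc, hg, List.all_eq_true] at h
  exact h uc hm

theorem pvInnerA_congr {rec1 rec2 : Int → Int → Bool} {vc : Int} :
    ∀ pairs : List (Int × Bool),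
    (∀ uc ∈ pairs.map Prod.fst, rec1 uc vc = rec2 uc vc) →
    pvInnerA rec1 vc pairs = pvInnerA rec2 vc pairs := by
  intro pairs
  induction pairs with
  | nil => intro _; rfl
  | cons p rest ih =>
    intro h
    obtain ⟨uc, a⟩ := p
    have h1 : rec1 uc vc = rec2 uc vc := h uc (by simp)
    have h2 := ih (fun x hx => h x (by simp [hx]))
    simp [pvInnerA, h1, h2]

theorem pvInnerA_fst {rec : Int → Int → Bool} {vc : Int} :
    ∀ {pairs pairs' : List (Int × Bool)},
    pvInnerA rec vc pairs = some pairs' → pairs'.map Prod.fst = pairs.map Prod.fst := by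
  intro pairs
  induction pairs with
  | nil => intro pairs' h; simp [pvInnerA] at h
  | cons p rest ih =>
    intro pairs' h
    obtain ⟨uc, a⟩ := p
    by_cases hb : (!a && rec uc vc) = true
    · simp [pvInnerA, hb] at h
      subst h; simp
    · simp [pvInnerA, hb] at h
      cases hr : pvInnerA rec vc rest with
      | none => rw [hr] at h; simp at h
      | some rest' =>
        rw [hr] at h; simp at h
        subst h; simp [ih hr]

theorem pvOuterA_congr {rec1 rec2 : Int → Int → Bool} :
    ∀ (csV : List Int) (pairs : List (Int × Bool)),
    (∀ uc ∈ pairs.map Prod.fst, ∀ vc ∈ csV, rec1 uc vc = rec2 uc vc) →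
    pvOuterA rec1 pairs csV = pvOuterA rec2 pairs csV := by
  intro csV
  induction csV with
  | nil => intro pairs _; rfl
  | cons vc vcs ih =>
    intro pairs h
    have h1 : pvInnerA rec1 vc pairs = pvInnerA rec2 vc pairs :=
      pvInnerA_congr pairs (fun uc hu => h uc hu vc (by simp))
    simp only [pvOuterA, h1]
    cases hr : pvInnerA rec2 vc pairs with
    | none => rfl
    | some pairs' =>
      exact ih pairs' (fun uc hu vc' hv =>
        h uc (by rw [pvInnerA_fst hr] at hu; exact hu) vc' (by simp [hv]))

-- fuel does not matter once it dominates the acyclicity bound (on either side)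
theorem pvGoA_fuel {original other : List (Int × List Int)} :
    ∀ (k : Nat) (u v : Int) (f1 f2 : Nat),
    (pvAcyc original k u = true ∨ pvAcyc other k v = true) → k ≤ f1 → k ≤ f2 →
    pvGoA original other f1 (some u) (some v) = pvGoA original other f2 (some u) (some v) := by
  intro k
  induction k with
  | zero =>
    intro u v f1 f2 h _ _
    cases h with
    | inl h => simp [pvAcyc] at h
    | inr h => simp [pvAcyc] at h
  | succ k ih =>
    intro u v f1 f2 h h1 h2
    obtain ⟨f1', rfl⟩ : ∃ f1', f1 = f1' + 1 := ⟨f1 - 1, by omega⟩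
    obtain ⟨f2', rfl⟩ : ∃ f2', f2 = f2' + 1 := ⟨f2 - 1, by omega⟩
    simp only [pvGoA]
    cases hu : pvDget original u with
    | none => cases pvDget other v <;> rfl
    | some csU =>
      cases hv : pvDget other v with
      | none => rfl
      | some csV =>
        by_cases hl : csU.length = csV.length
        · simp only [hl, if_true]
          apply pvOuterA_congr
          intro uc hu' vc' hv'
          have hmemU : uc ∈ csU := by simpa using hu'
          have hac : pvAcyc original k uc = true ∨ pvAcyc other k vc' = true := by
            cases h with
            | inl h => exact Or.inl (pvAcyc_child h hu hmemU)
            | inr h => exact Or.inr (pvAcyc_child h hv hv')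
          exact ih uc vc' f1' f2' hac (by omega) (by omega)
        · simp [hl]

def pvMemoOK (original other : List (Int × List Int)) (m : PySem.Dict (Int × Int) Bool) : Prop :=
  ∀ u v b, m.get? (u, v) = some b →
    b = pvGoA original other (original.length + other.length + 2) (some u) (some v)

theorem pvMemoOK_empty (original other : List (Int × List Int)) :
    pvMemoOK original other PySem.Dict.empty := by
  intro u v b h
  simp [PySem.Dict.get?_empty] at h

theorem pvMemoOK_insert {original other : List (Int × List Int)} {m : PySem.Dict (Int × Int) Bool}
    {u v : Int} {b : Bool}
    (hm : pvMemoOK original other m)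
    (hb : b = pvGoA original other (original.length + other.length + 2) (some u) (some v)) :
    pvMemoOK original other (m.insert (u, v) b) := by
  intro u' v' b' h
  rw [PySem.Dict.get?_insert] at h
  by_cases he : (u', v') = (u, v)
  · simp [he] at h
    obtain ⟨h1, h2⟩ := Prod.mk.injEq .. ▸ he
    subst h1; subst h2; subst h
    exact hb
  · simp [he] at h
    exact hm u' v' b' h

theorem pvInnerA_cons_true {rec : Int → Int → Bool} {vc uc : Int} {rest : List (Int × Bool)} :
    pvInnerA rec vc ((uc, true) :: rest) =
      match pvInnerA rec vc rest with
      | some r => some ((uc, true) :: r)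
      | none => none := by
  simp [pvInnerA]

theorem pvInnerA_cons_false_pos {rec : Int → Int → Bool} {vc uc : Int} {rest : List (Int × Bool)}
    (h : rec uc vc = true) :
    pvInnerA rec vc ((uc, false) :: rest) = some ((uc, true) :: rest) := by
  simp [pvInnerA, h]

theorem pvInnerA_cons_false_neg {rec : Int → Int → Bool} {vc uc : Int} {rest : List (Int × Bool)}
    (h : rec uc vc = false) :
    pvInnerA rec vc ((uc, false) :: rest) =
      match pvInnerA rec vc rest with
      | some r => some ((uc, false) :: r)
      | none => none := by
  simp [pvInnerA, h]

theorem pvFindB_cons {rec : Int → Int → PySem.Dict (Int × Int) Bool → Bool × PySem.Dict (Int × Int) Bool}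
    {vc uc : Int} {rest : List Int} {m : PySem.Dict (Int × Int) Bool} :
    pvFindB rec vc (uc :: rest) m =
      (match rec uc vc m with
       | (true, m') => (some rest, m')
       | (false, m') =>
         match pvFindB rec vc rest m' with
         | (o, m'') => ((o.map (fun r => uc :: r)), m'')) := rfl

-- find-and-pop on 'remaining' tracks A's first-unassigned scan over the flagged pairs
theorem pvFindB_innerA {original other : List (Int × List Int)} {f : Nat} {vc : Int}
    {recA : Int → Int → Bool} :
    ∀ (pairs : List (Int × Bool)) (m : PySem.Dict (Int × Int) Bool),
    (∀ uc ∈ pairs.map Prod.fst, ∀ m' : PySem.Dict (Int × Int) Bool,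
        pvMemoOK original other m' →
        (pvGoB original other f uc vc m').1 = recA uc vc ∧
        pvMemoOK original other (pvGoB original other f uc vc m').2) →
    pvMemoOK original other m →
    pvMemoOK original other (pvFindB (fun a b mm => pvGoB original other f a b mm) vc (pairs.filterMap (fun p => if p.2 then none else some p.1)) m).2 ∧
    (match pvInnerA recA vc pairs with
     | none => (pvFindB (fun a b mm => pvGoB original other f a b mm) vc (pairs.filterMap (fun p => if p.2 then none else some p.1)) m).1 = none
     | some pairs' => (pvFindB (fun a b mm => pvGoB original other f a b mm) vc (pairs.filterMap (fun p => if p.2 then none else some p.1)) m).1 = some (pairs'.filterMap (fun p => if p.2 then none else some p.1))) := by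
  intro pairs
  induction pairs with
  | nil =>
    intro m _ hm
    exact ⟨hm, by simp [pvInnerA, pvFindB]⟩
  | cons p rest ih =>
    intro m hH hm
    obtain ⟨uc, a⟩ := p
    have hHrest : ∀ uc ∈ rest.map Prod.fst, ∀ m' : PySem.Dict (Int × Int) Bool,
        pvMemoOK original other m' →
        (pvGoB original other f uc vc m').1 = recA uc vc ∧
        pvMemoOK original other (pvGoB original other f uc vc m').2 :=
      fun x hx => hH x (by simp [hx])
    cases a with
    | true =>
      have hrw : ((uc, true) :: rest).filterMap (fun p => if p.2 then none else some p.1) = rest.filterMap (fun p => if p.2 then none else some p.1) := by simp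
      rw [hrw]
      have hrec := ih m hHrest hm
      refine ⟨hrec.1, ?_⟩
      cases hr : pvInnerA recA vc rest with
      | none =>
        rw [pvInnerA_cons_true, hr]
        rw [hr] at hrec
        simpa using hrec.2
      | some rest' =>
        rw [pvInnerA_cons_true, hr]
        rw [hr] at hrec
        simpa using hrec.2
    | false =>
      have hrw : ((uc, false) :: rest).filterMap (fun p => if p.2 then none else some p.1) = uc :: rest.filterMap (fun p => if p.2 then none else some p.1) := by simp
      rw [hrw]
      have huc := hH uc (by simp) m hm
      cases hgb : pvGoB original other f uc vc m with
      | mk b m' =>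
        rw [hgb] at huc
        obtain ⟨hb, hm'⟩ := huc
        cases hbv : recA uc vc with
        | true =>
          have hbt : b = true := by simpa [hbv] using hb
          subst hbt
          rw [pvInnerA_cons_false_pos hbv]
          refine ⟨?_, ?_⟩
          · simpa [pvFindB_cons, hgb] using hm'
          · simp [pvFindB_cons, hgb]
        | false =>
          have hbt : b = false := by simpa [hbv] using hb
          subst hbt
          rw [pvInnerA_cons_false_neg hbv]
          have hrec := ih m' hHrest hm'
          cases hfr : pvFindB (fun a b mm => pvGoB original other f a b mm) vc (rest.filterMap (fun p => if p.2 then none else some p.1)) m' with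
          | mk o m'' =>
            rw [hfr] at hrec
            cases hr : pvInnerA recA vc rest with
            | none =>
              rw [hr] at hrec
              simp only at hrec
              refine ⟨?_, ?_⟩
              · simpa [pvFindB_cons, hgb, hfr] using hrec.1
              · simp [pvFindB_cons, hgb, hfr, hrec.2]
            | some rest' =>
              rw [hr] at hrec
              simp only at hrec
              refine ⟨?_, ?_⟩
              · simpa [pvFindB_cons, hgb, hfr] using hrec.1
              · simp [pvFindB_cons, hgb, hfr, hrec.2]

theorem pvMatchB_outerA {original other : List (Int × List Int)} {f : Nat}
    {recA : Int → Int → Bool} :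
    ∀ (csV : List Int) (pairs : List (Int × Bool)) (m : PySem.Dict (Int × Int) Bool),
    (∀ uc ∈ pairs.map Prod.fst, ∀ vc' ∈ csV, ∀ m' : PySem.Dict (Int × Int) Bool,
        pvMemoOK original other m' →
        (pvGoB original other f uc vc' m').1 = recA uc vc' ∧
        pvMemoOK original other (pvGoB original other f uc vc' m').2) →
    pvMemoOK original other m →
    (pvMatchB (fun a b mm => pvGoB original other f a b mm) (pairs.filterMap (fun p => if p.2 then none else some p.1)) csV m).1 = pvOuterA recA pairs csV ∧
    pvMemoOK original other (pvMatchB (fun a b mm => pvGoB original other f a b mm) (pairs.filterMap (fun p => if p.2 then none else some p.1)) csV m).2 := by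
  intro csV
  induction csV with
  | nil =>
    intro pairs m _ hm
    exact ⟨by simp [pvMatchB, pvOuterA], by simpa [pvMatchB] using hm⟩
  | cons vc vcs ih =>
    intro pairs m hH hm
    have hfind := pvFindB_innerA (f := f) (vc := vc) (recA := recA) pairs m
      (fun uc hu m' hm' => hH uc hu vc (by simp) m' hm') hm
    simp only [pvMatchB, pvOuterA]
    cases hr : pvInnerA recA vc pairs with
    | none =>
      rw [hr] at hfind
      simp only at hfind
      cases hfr : pvFindB (fun a b mm => pvGoB original other f a b mm) vc (pairs.filterMap (fun p => if p.2 then none else some p.1)) m with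
      | mk o m' =>
        rw [hfr] at hfind
        simp at hfind
        simp [hfind.2]
        exact hfind.1
    | some pairs' =>
      rw [hr] at hfind
      simp only at hfind
      cases hfr : pvFindB (fun a b mm => pvGoB original other f a b mm) vc (pairs.filterMap (fun p => if p.2 then none else some p.1)) m with
      | mk o m' =>
        rw [hfr] at hfind
        simp at hfind
        rw [hfind.2]
        have hHp : ∀ uc ∈ pairs'.map Prod.fst, ∀ vc' ∈ vcs, ∀ m' : PySem.Dict (Int × Int) Bool,
            pvMemoOK original other m' →
            (pvGoB original other f uc vc' m').1 = recA uc vc' ∧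
            pvMemoOK original other (pvGoB original other f uc vc' m').2 := by
          intro x hx vc' hv
          exact hH x (by rw [← pvInnerA_fst hr]; exact hx) vc' (by simp [hv])
        exact ih pairs' m' hHp hfind.1

-- main invariant: under one-sided acyclicity B returns A's (sufficient-fuel) value and keeps the memo correct
theorem pvGoB_correct {original other : List (Int × List Int)} :
    ∀ (f k : Nat) (u v : Int) (m : PySem.Dict (Int × Int) Bool),
    (pvAcyc original k u = true ∨ pvAcyc other k v = true) → k ≤ f →
    k ≤ original.length + other.length + 1 →
    pvMemoOK original other m →
    (pvGoB original other f u v m).1 = pvGoA original other (original.length + other.length + 2) (some u) (some v) ∧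
    pvMemoOK original other (pvGoB original other f u v m).2 := by
  intro f
  induction f with
  | zero =>
    intro k u v m hac hkf _ _
    have h1 : 1 ≤ k := by
      cases hac with
      | inl h => exact pvAcyc_pos h
      | inr h => exact pvAcyc_pos h
    omega
  | succ f ih =>
    intro k u v m hac hkf hkL hm
    have h1 : 1 ≤ k := by
      cases hac with
      | inl h => exact pvAcyc_pos h
      | inr h => exact pvAcyc_pos h
    obtain ⟨k', rfl⟩ : ∃ k', k = k' + 1 := ⟨k - 1, by omega⟩
    simp only [pvGoB]
    cases hget : m.get? (u, v) with
    | some b =>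
      exact ⟨hm u v b hget, hm⟩
    | none =>
      have hBIG : original.length + other.length + 2 = (original.length + other.length + 1) + 1 := rfl
      cases hu : pvDget original u with
      | none =>
        cases hv : pvDget other v with
        | none =>
          refine ⟨?_, ?_⟩
          · rw [hBIG]; simp [pvGoA, hu, hv, pvStore]
          · simp only [pvStore]
            refine pvMemoOK_insert hm ?_
            rw [hBIG]; simp [pvGoA, hu, hv]
        | some csV =>
          refine ⟨?_, ?_⟩
          · rw [hBIG]; simp [pvGoA, hu, hv, pvStore]
          · simp only [pvStore]
            refine pvMemoOK_insert hm ?_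
            rw [hBIG]; simp [pvGoA, hu, hv]
      | some csU =>
        cases hv : pvDget other v with
        | none =>
          refine ⟨?_, ?_⟩
          · rw [hBIG]; simp [pvGoA, hu, hv, pvStore]
          · simp only [pvStore]
            refine pvMemoOK_insert hm ?_
            rw [hBIG]; simp [pvGoA, hu, hv]
        | some csV =>
          by_cases hl : csU.length = csV.length
          · -- the matching case
            have hH : ∀ uc ∈ (csU.map (fun uc => (uc, false))).map Prod.fst, ∀ vc' ∈ csV,
                ∀ m' : PySem.Dict (Int × Int) Bool, pvMemoOK original other m' →
                (pvGoB original other f uc vc' m').1 =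
                  (fun uc vc => pvGoA original other (original.length + other.length + 1) (some uc) (some vc)) uc vc' ∧
                pvMemoOK original other (pvGoB original other f uc vc' m').2 := by
              intro uc huc vc' hvc m' hm'
              have hmemU : uc ∈ csU := by simpa using huc
              have hac' : pvAcyc original k' uc = true ∨ pvAcyc other k' vc' = true := by
                cases hac with
                | inl h => exact Or.inl (pvAcyc_child h hu hmemU)
                | inr h => exact Or.inr (pvAcyc_child h hv hvc)
              have := ih k' uc vc' m' hac' (by omega) (by omega)
              refine ⟨?_, (this hm').2⟩
              rw [(this hm').1]
              exact pvGoA_fuel k' uc vc' (original.length + other.length + 2) (original.length + other.length + 1)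
                hac' (by omega) (by omega)
            have hmb := pvMatchB_outerA csV (csU.map (fun uc => (uc, false))) m hH hm
            have hfil : (csU.map (fun uc => (uc, false))).filterMap (fun p => if p.2 then none else some p.1) = csU := by
              simp [List.filterMap_map, Function.comp]
            rw [hfil] at hmb
            have hA : pvGoA original other (original.length + other.length + 2) (some u) (some v) =
                pvOuterA (fun uc vc => pvGoA original other (original.length + other.length + 1) (some uc) (some vc))
                  (csU.map (fun uc => (uc, false))) csV := by
              rw [hBIG]; simp [pvGoA, hu, hv, hl]
            simp only [hu, hv, hl, if_true, pvStore]
            constructor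
            · rw [hA]; exact hmb.1
            · refine pvMemoOK_insert hmb.2 ?_
              rw [hA]; exact hmb.1
          · refine ⟨?_, ?_⟩
            · rw [hBIG]; simp [pvGoA, hu, hv, hl, pvStore]
            · simp only [pvStore, hl, if_neg hl]
              refine pvMemoOK_insert hm ?_
              rw [hBIG]; simp [pvGoA, hu, hv, hl]

-- ===== VERDICT (by name: the statement is the Claim_ definition above) =====
theorem check_isomorph_spec : Claim_equal_check_isomorph := by
  intro original other orig_node othr_node _ hpre
  unfold Spec_check_isomorph check_isomorph check_isomorph_alt
  cases orig_node with
  | none => simp [pvGoA]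
  | some u =>
    cases othr_node with
    | none => simp [pvGoA]
    | some v =>
      rw [Pre_check_isomorph, pvPreB] at hpre
      have hac : pvAcyc original (original.length + other.length + 1) u = true ∨
          pvAcyc other (original.length + other.length + 1) v = true := by
        simpa using hpre
      exact ((pvGoB_correct (original.length + other.length + 2)
        (original.length + other.length + 1) u v PySem.Dict.empty hac (by omega) (by omega)
        (pvMemoOK_empty original other)).1).symm
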